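-- pv_equiv track=rewrite | github.com/Michael-Sebero/Numerology-Name-Generator | name_generator.py | get_vowels
-- ===== SOURCE A (Python) =====
-- def get_vowels(name):
--     """Extract vowels from name, including Y when used as vowel"""
--     vowels = []
--     name = name.upper().replace(' ', '')
--     vowel_letters = 'AEIOU'
--
--     for i, letter in enumerate(name):
--         if letter in vowel_letters:
--             vowels.append(letter)
--         elif letter == 'Y':
--             # Include Y if it's used as a vowel (simple heuristic)
--             # Y is typically a vowel when not at the beginning of a syllable
--             if i > 0 and name[i-1] not in vowel_letters:
--                 vowels.append(letter)
--
--     return vowels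
-- ===== SOURCE B (Python) =====
-- def get_vowels(name):
--     """Extract vowels from name, including Y when used as vowel"""
--     s = name.upper().replace(' ', '')
--     # Demote every Y that is NOT acting as a vowel to lowercase 'y':
--     # a leading Y, and any Y immediately preceded by a vowel.
--     if s.startswith('Y'):
--         s = 'y' + s[1:]
--     for v in 'AEIOU':
--         s = s.replace(v + 'Y', v + 'y')
--     # What remains uppercase among AEIOUY is exactly the vowel sequence.
--     return [c for c in s if c in 'AEIOUY']
-- ===== Notes on version B (the rewrite author's own statement) =====
-- stated objective: alternative
-- what changed: Replaces A's indexed loop with positional prev-lookup by a staged string-rewriting pipeline: replace passes (plus a leading-Y fix) lowercase every Y that is not acting as a vowel, after which a plain membership filter collects the vowels, so no loop ever inspects a neighbouring position.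
import Mathlib
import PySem

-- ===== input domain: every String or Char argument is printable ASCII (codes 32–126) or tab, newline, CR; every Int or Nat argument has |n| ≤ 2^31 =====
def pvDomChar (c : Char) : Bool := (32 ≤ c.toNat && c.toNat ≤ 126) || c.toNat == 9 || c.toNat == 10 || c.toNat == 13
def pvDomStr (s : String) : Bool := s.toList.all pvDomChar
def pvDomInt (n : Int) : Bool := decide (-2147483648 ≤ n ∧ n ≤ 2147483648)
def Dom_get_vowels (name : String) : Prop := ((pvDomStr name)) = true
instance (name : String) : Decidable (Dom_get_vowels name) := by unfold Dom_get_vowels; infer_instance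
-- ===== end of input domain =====

-- B replaces A's indexed loop (enumerate + name[i-1] lookup) by staged string
-- rewriting: replace-passes demote every consonant-role Y to 'y', then a plain
-- membership filter collects the vowels (alternative decomposition, same cost).

-- ===== PORT A =====
-- 'AEIOU' used as a membership test for single characters
def pvVowelLetters : List Char := ['A', 'E', 'I', 'O', 'U']

-- the for-loop of A as structural recursion over enumerate(name); `full` is the
-- (fixed) character list of the processed name, used for the name[i-1] lookup
def get_vowels_loop (full : List Char) : List (Int × Char) → List String → List String
  | [], vowels => vowels
  | (i, letter) :: rest, vowels =>
    if letter ∈ pvVowelLetters then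
      get_vowels_loop full rest (vowels ++ [String.ofList [letter]])
    else if letter = 'Y' then
      -- 'i > 0 and name[i-1] not in vowel_letters' (short-circuit kept: the
      -- lookup result is inspected only when it exists; inside the loop it always does)
      if 0 < i ∧ ((PySem.List.pyGet? full (i - 1)).any fun p => decide (p ∉ pvVowelLetters)) = true then
        get_vowels_loop full rest (vowels ++ [String.ofList [letter]])
      else
        get_vowels_loop full rest vowels
    else
      get_vowels_loop full rest vowels

def get_vowels (name : String) : List String :=
  let name := PySem.Str.replace (PySem.Str.upper name) " " ""
  get_vowels_loop name.toList (PySem.List.enumerate name.toList) []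

-- ===== PORT B =====
-- chars kept by the final comprehension's membership test 'c in "AEIOUY"'
def pvKeepLetters : List Char := ['A', 'E', 'I', 'O', 'U', 'Y']

def get_vowels_alt (name : String) : List String :=
  let s := PySem.Str.replace (PySem.Str.upper name) " " ""
  -- if s.startswith('Y'): s = 'y' + s[1:]
  let s := if PySem.Str.startswith s "Y"
           then String.ofList ('y' :: PySem.Chars.slice s.toList (some 1) none)
           else s
  -- for v in 'AEIOU': s = s.replace(v + 'Y', v + 'y')
  let s := pvVowelLetters.foldl
    (fun s v => PySem.Str.replace s (String.ofList [v, 'Y']) (String.ofList [v, 'y'])) s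
  -- [c for c in s if c in 'AEIOUY']
  s.toList.filterMap fun c => if c ∈ pvKeepLetters then some (String.ofList [c]) else none

-- ===== PRECONDITION & SPEC =====
def Spec_get_vowels (name : String) (out : List String) : Prop := out = get_vowels_alt name
instance (name : String) (out : List String) : Decidable (Spec_get_vowels name out) := by unfold Spec_get_vowels; infer_instance

-- ===== CLAIM (what is proved, stated in full; the proofs are below) =====
def Claim_equal_get_vowels : Prop := ∀ (name : String), Dom_get_vowels name → Spec_get_vowels name (get_vowels name)

-- ===== LEMMAS AND PROOFS =====

-- canonical selection: walk the list carrying the previous character (sentinel 'A')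
def pvSel : Char → List Char → List String
  | _, [] => []
  | p, c :: cs =>
    (if c ∈ pvVowelLetters ∨ (c = 'Y' ∧ p ∉ pvVowelLetters) then [String.ofList [c]] else []) ++ pvSel c cs

-- previous character seen by A before the current suffix (sentinel 'A' when none)
def pvPrev (l : List Char) : Char := l.getLast?.getD 'A'

theorem pvPrev_append_singleton (l : List Char) (c : Char) : pvPrev (l ++ [c]) = c := by
  simp [pvPrev]

theorem pvLoop_eq_sel (l₂ l₁ : List Char) (acc : List String) :
    get_vowels_loop (l₁ ++ l₂) (PySem.List.enumerate l₂ (l₁.length : Int)) acc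
      = acc ++ pvSel (pvPrev l₁) l₂ := by
  induction l₂ generalizing l₁ acc with
  | nil => simp [PySem.List.enumerate_nil, get_vowels_loop, pvSel]
  | cons c cs ih =>
    rw [PySem.List.enumerate_cons]
    have hcast : ((l₁.length : Int) + 1) = ((l₁ ++ [c]).length : Int) := by
      simp
    have hfull : l₁ ++ c :: cs = (l₁ ++ [c]) ++ cs := by simp
    by_cases hv : c ∈ pvVowelLetters
    · rw [get_vowels_loop, if_pos hv, hcast, hfull, ih (l₁ ++ [c])]
      simp [pvSel, hv, pvPrev_append_singleton]
    · by_cases hy : c = 'Y'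
      · -- the Y branch: the guard matches the pvSel condition with prev = pvPrev l₁
        have hguard : (0 < (l₁.length : Int) ∧
            ((PySem.List.pyGet? (l₁ ++ c :: cs) ((l₁.length : Int) - 1)).any
              fun p => decide (p ∉ pvVowelLetters)) = true)
            ↔ (c ∈ pvVowelLetters ∨ (c = 'Y' ∧ pvPrev l₁ ∉ pvVowelLetters)) := by
          rcases List.eq_nil_or_concat l₁ with h | ⟨l₀, a, rfl⟩
          · subst h
            simp [pvPrev, hy]
            decide
          · simp only [List.concat_eq_append] at hcast hfull ⊢
            have hlen : 1 ≤ (l₀ ++ [a]).length := by simp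
            have h1 : ((((l₀ ++ [a]).length : Nat) : Int) - 1) = (((l₀ ++ [a]).length - 1 : Nat) : Int) := by
              omega
            have h2 : (l₀ ++ [a]).length - 1 = l₀.length := by simp
            rw [h1, PySem.List.pyGet?_natCast, h2]
            have h3 : ((l₀ ++ [a]) ++ c :: cs)[l₀.length]? = some a := by
              rw [List.append_assoc]
              simp
            rw [h3]
            simp [pvPrev, hy]
            exact fun h' => absurd h' (by decide)
        rw [get_vowels_loop, if_neg hv, if_pos hy]
        by_cases hc : c ∈ pvVowelLetters ∨ (c = 'Y' ∧ pvPrev l₁ ∉ pvVowelLetters)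
        · rw [if_pos (hguard.mpr hc), hcast, hfull, ih (l₁ ++ [c])]
          simp [pvSel, hc, pvPrev_append_singleton]
        · rw [if_neg (fun h => hc (hguard.mp h)), hcast, hfull, ih (l₁ ++ [c])]
          simp [pvSel, hc, pvPrev_append_singleton]
      · rw [get_vowels_loop, if_neg hv, if_neg hy, hcast, hfull, ih (l₁ ++ [c])]
        simp [pvSel, hv, hy, pvPrev_append_singleton]

-- A's result, canonically
theorem pvA_eq_sel (name : String) :
    get_vowels name = pvSel 'A' (PySem.Str.replace (PySem.Str.upper name) " " "").toList := by
  unfold get_vowels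
  have h := pvLoop_eq_sel (PySem.Str.replace (PySem.Str.upper name) " " "").toList [] []
  simpa [pvPrev] using h

-- ===== B-side lemmas =====

-- one replace pass s.replace(v+'Y', v+'y'), written structurally
def pvRep1 (v : Char) : List Char → List Char
  | [] => []
  | [c] => [c]
  | c :: d :: t =>
    if c = v ∧ d = 'Y' then c :: 'y' :: pvRep1 v t else c :: pvRep1 v (d :: t)

-- the same pass carrying the previous character q (sentinel at the front)
def pvDm1 (v q : Char) : List Char → List Char
  | [] => []
  | c :: t => (if c = 'Y' ∧ q = v then 'y' else c) :: pvDm1 v c t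

-- cumulative demotion: 'Y' becomes 'y' when the previous ORIGINAL character is in V;
-- b says whether the (virtual) character before the current head is in V
def pvMark (V : List Char) : Bool → List Char → List Char
  | _, [] => []
  | b, c :: t => (if c = 'Y' ∧ b then 'y' else c) :: pvMark V (c ∈ V) t
theorem pvRep1_go (v : Char) (hv : v ≠ 'Y') :
    ∀ (l acc : List Char) (fuel : Nat), l.length ≤ fuel →
      PySem.Chars.replace.go [v, 'Y'] [v, 'y'] fuel l acc = acc.reverse ++ pvRep1 v l := by
  intro l acc fuel
  induction fuel generalizing l acc with
  | zero =>
    intro h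
    have : l = [] := List.eq_nil_of_length_eq_zero (Nat.le_zero.mp h)
    subst this
    simp [PySem.Chars.replace.go, pvRep1]
  | succ n ih =>
    intro h
    match l with
    | [] => simp [PySem.Chars.replace.go, pvRep1]
    | c :: t =>
      rw [PySem.Chars.replace.go]
      by_cases hp : [v, 'Y'].isPrefixOf (c :: t) = true
      · rw [if_pos hp]
        match t, hp with
        | [], hp => exact absurd hp (by simp [List.isPrefixOf])
        | d :: t', hp =>
          have hcd : v = c ∧ 'Y' = d := by
            simpa [List.isPrefixOf] using hp
          simp only [List.length_cons] at h
          simp only [List.length_cons, List.length_nil, List.drop_succ_cons, List.drop_zero]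
          rw [ih t' _ (by omega)]
          simp [pvRep1, hcd.1.symm, hcd.2.symm]
      · rw [if_neg hp]
        simp only [List.length_cons] at h
        rw [ih t (c :: acc) (by omega)]
        match t with
        | [] => simp [pvRep1]
        | d :: t' =>
          have : ¬ (c = v ∧ d = 'Y') := by
            intro ⟨h1, h2⟩; subst h1; subst h2
            simp [List.isPrefixOf] at hp
          simp [pvRep1, this]


theorem pvReplace_eq_rep1 (v : Char) (hv : v ≠ 'Y') (l : List Char) :
    PySem.Chars.replace l [v, 'Y'] [v, 'y'] = pvRep1 v l := by
  rw [PySem.Chars.replace, if_neg (by simp)]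
  exact pvRep1_go v hv l [] l.length le_rfl

theorem pvRep1_eq_dm1 (v : Char) (hv : v ≠ 'Y') :
    ∀ (l : List Char) (q : Char), (q = v → l.head? ≠ some 'Y') → pvRep1 v l = pvDm1 v q l := by
  intro l
  induction l using pvRep1.induct v with
  | case1 => intro q _; rfl
  | case2 c =>
    intro q hq
    by_cases h : c = 'Y' ∧ q = v
    · exact absurd (by simp [h.1]) (hq h.2)
    · simp [pvRep1, pvDm1, h]
  | case3 c d t hcd ih =>
    intro q hq
    have hc : ¬ (c = 'Y' ∧ q = v) := by
      rintro ⟨h1, h2⟩; exact (hq h2) (by simp [h1])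
    rw [pvRep1, if_pos hcd, pvDm1, if_neg hc, pvDm1, if_pos ⟨hcd.2, hcd.1⟩]
    rw [ih d (by intro h _; exact hv (h.symm.trans hcd.2))]
  | case4 c d t hcd ih =>
    intro q hq
    have hc : ¬ (c = 'Y' ∧ q = v) := by
      rintro ⟨h1, h2⟩; exact (hq h2) (by simp [h1])
    rw [pvRep1, if_neg hcd, pvDm1, if_neg hc]
    rw [ih c (by intro h hd; simp at hd; exact hcd ⟨h, hd⟩)]

theorem pvDm1_mark (v : Char) (hv : v ≠ 'Y' ∧ v ≠ 'y') (V : List Char) :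
    ∀ (l : List Char) (b : Bool) (q : Char),
      pvDm1 v q (pvMark V b l) = pvMark (v :: V) (b || decide (q = v)) l := by
  intro l
  induction l with
  | nil => intro b q; rfl
  | cons c t ih =>
    intro b q
    rw [pvMark, pvDm1, pvMark, ih]
    congr 1
    · -- heads agree
      by_cases hcy : c = 'Y'
      · subst hcy
        by_cases hb : b = true
        · simp [hb, (by decide : ¬ ('y' = 'Y'))]
        · by_cases hq : q = v <;> simp [hb, hq]
      · simp [hcy]
    · -- tails agree: the demoted previous character equals v iff the original does
      have h1 : ((if c = 'Y' ∧ b = true then 'y' else c) = v) ↔ (c = v) := by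
        split_ifs with h
        · constructor
          · intro h'; exact absurd h'.symm hv.2
          · intro h'; exact absurd (h'.symm.trans h.1) hv.1
        · exact Iff.rfl
      congr 1
      simp [h1, List.mem_cons, Bool.or_comm]

theorem pvMark_nil_false (l : List Char) : pvMark [] false l = l := by
  induction l with
  | nil => rfl
  | cons c t ih => simp [pvMark, ih]

theorem pvVowel_keep (c : Char) (h : c ∈ pvVowelLetters) : c ∈ pvKeepLetters := by
  simp only [pvVowelLetters, List.mem_cons, List.not_mem_nil, or_false] at h
  rcases h with rfl | rfl | rfl | rfl | rfl <;> decide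

theorem pvKeep_cases (c : Char) (h : c ∈ pvKeepLetters) : c ∈ pvVowelLetters ∨ c = 'Y' := by
  simp only [pvKeepLetters, List.mem_cons, List.not_mem_nil, or_false] at h
  rcases h with rfl | rfl | rfl | rfl | rfl | rfl <;> decide

-- the body of B's final comprehension, named so the filterMap lemmas apply cleanly
def pvF (c : Char) : Option String :=
  if c ∈ pvKeepLetters then some (String.ofList [c]) else none

theorem pvFilter_mark (V : List Char) (hV : ∀ c, c ∈ V ↔ c ∈ pvVowelLetters) :
    ∀ (l : List Char) (p : Char) (b : Bool), (b = true ↔ p ∈ pvVowelLetters) →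
      (pvMark V b l).filterMap pvF = pvSel p l := by
  intro l
  induction l with
  | nil => intro p b hb; rfl
  | cons c t ih =>
    intro p b hb
    have ih' := ih c (c ∈ V) (by simp [hV])
    by_cases hcy : c = 'Y'
    · subst hcy
      by_cases hb' : b = true
      · -- Y demoted to 'y': dropped by the filter; pvSel drops it too (prev is a vowel)
        have hsel : ¬ (('Y' : Char) ∈ pvVowelLetters ∨ (('Y' : Char) = 'Y' ∧ p ∉ pvVowelLetters)) := by
          rintro (h | ⟨-, h2⟩)
          · exact absurd h (by decide)
          · exact h2 (hb.mp hb')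
        rw [pvMark, if_pos ⟨rfl, hb'⟩,
          List.filterMap_cons_none (show pvF 'y' = none by decide), ih',
          pvSel, if_neg hsel, List.nil_append]
      · -- Y kept: prev is not a vowel, pvSel keeps it too
        have hp : p ∉ pvVowelLetters := fun hp => hb' (hb.mpr hp)
        rw [pvMark, if_neg (by rintro ⟨-, h⟩; exact hb' h),
          List.filterMap_cons_some (show pvF 'Y' = some (String.ofList ['Y']) by decide), ih',
          pvSel, if_pos (Or.inr ⟨rfl, hp⟩), List.singleton_append]
    · rw [pvMark, if_neg (by rintro ⟨h, -⟩; exact hcy h)]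
      by_cases hcv : c ∈ pvVowelLetters
      · rw [List.filterMap_cons_some (show pvF c = some (String.ofList [c]) from if_pos (pvVowel_keep c hcv)),
          ih', pvSel, if_pos (Or.inl hcv), List.singleton_append]
      · have hk : c ∉ pvKeepLetters := fun h => (pvKeep_cases c h).elim hcv hcy
        rw [List.filterMap_cons_none (show pvF c = none from if_neg hk), ih',
          pvSel, if_neg (by simp [hcv, hcy]), List.nil_append]

-- one replace pass moves pvMark one vowel forward ('Q' is a neutral sentinel: no vowel)
theorem pvStep (v : Char) (hv : v ≠ 'Y' ∧ v ≠ 'y') (hqv : ¬ (('Q' : Char) = v))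
    (w : String) (V : List Char) (b : Bool) (l : List Char) (hw : w.toList = pvMark V b l) :
    (PySem.Str.replace w (String.ofList [v, 'Y']) (String.ofList [v, 'y'])).toList
      = pvMark (v :: V) b l := by
  rw [PySem.Str.toList_replace, String.toList_ofList, String.toList_ofList, hw,
    pvReplace_eq_rep1 v hv.1, pvRep1_eq_dm1 v hv.1 _ 'Q' (fun h => absurd h hqv),
    pvDm1_mark v hv V, decide_eq_false hqv, Bool.or_false]

-- the leading-Y fix is pvMark [] true
theorem pvLead_toList (s : String) :
    (if PySem.Str.startswith s "Y"
     then String.ofList ('y' :: PySem.Chars.slice s.toList (some 1) none)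
     else s).toList = pvMark [] true s.toList := by
  by_cases hY : PySem.Str.startswith s "Y" = true
  · rw [if_pos hY]
    simp only [PySem.Str.startswith_eq] at hY
    obtain ⟨t, ht⟩ := (PySem.Chars.startswith_iff _ _).mp hY
    have hs : s.toList = 'Y' :: t := by simpa using ht.symm
    rw [String.toList_ofList, hs]
    have hsl : PySem.Chars.slice ('Y' :: t) (some 1) none = t := by
      simp [pysem]
    rw [hsl, pvMark, if_pos ⟨rfl, rfl⟩]
    simp [pvMark_nil_false]
  · rw [if_neg hY]
    match hls : s.toList with
    | [] => rfl
    | c :: t =>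
      have hc : ¬ (c = 'Y') := by
        rintro rfl
        exact hY ((by simpa [hls] using
          (PySem.Chars.startswith_iff s.toList "Y".toList).mpr (by rw [hls]; exact ⟨t, rfl⟩)))
      rw [pvMark, if_neg (by rintro ⟨h, -⟩; exact hc h)]
      simp [pvMark_nil_false]

-- B's result, canonically
theorem pvB_eq_sel (name : String) :
    get_vowels_alt name = pvSel 'A' (PySem.Str.replace (PySem.Str.upper name) " " "").toList := by
  unfold get_vowels_alt
  set s0 := PySem.Str.replace (PySem.Str.upper name) " " "" with hs0
  simp only [pvVowelLetters, List.foldl_cons, List.foldl_nil]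
  have h0 := pvLead_toList s0
  have h1 := pvStep 'A' (by decide) (by decide) _ [] true s0.toList h0
  have h2 := pvStep 'E' (by decide) (by decide) _ ['A'] true s0.toList h1
  have h3 := pvStep 'I' (by decide) (by decide) _ ['E', 'A'] true s0.toList h2
  have h4 := pvStep 'O' (by decide) (by decide) _ ['I', 'E', 'A'] true s0.toList h3
  have h5 := pvStep 'U' (by decide) (by decide) _ ['O', 'I', 'E', 'A'] true s0.toList h4
  rw [h5]
  clear h0 h1 h2 h3 h4 h5
  have hV : ∀ c, c ∈ (['U', 'O', 'I', 'E', 'A'] : List Char) ↔ c ∈ pvVowelLetters := by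
    intro c; simp [pvVowelLetters]; tauto
  have hfin := pvFilter_mark ['U', 'O', 'I', 'E', 'A'] hV s0.toList 'A' true
    (by simp [pvVowelLetters])
  exact hfin

-- ===== VERDICT (by name: the statement is the Claim_ definition above) =====
theorem get_vowels_spec : Claim_equal_get_vowels := by
  intro name _
  unfold Spec_get_vowels
  rw [pvA_eq_sel, pvB_eq_sel]
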